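-- pv_equiv track=rewrite | github.com/Dmitry-Osipov/MyProjects | Python_Knowleges/Homework/Algorithm/lesson1.py | cycles_counter
-- ===== SOURCE A (Python) =====
-- def cycles_counter(faces):
--     count = 0
--     for i in range(faces):
--         for j in range(faces):
--             for k in range(faces):
--                 for m in range(faces):
--                     count += 1
--     return count
-- ===== SOURCE B (Python) =====
-- def cycles_counter(faces):
--     n = faces if faces > 0 else 0
--     return n ** 4
-- ===== Notes on version B (the rewrite author's own statement) =====
-- stated objective: faster
-- what changed: Replaced the quadruple nested counting loop by the closed form max(faces,0)**4.
import Mathlib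
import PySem

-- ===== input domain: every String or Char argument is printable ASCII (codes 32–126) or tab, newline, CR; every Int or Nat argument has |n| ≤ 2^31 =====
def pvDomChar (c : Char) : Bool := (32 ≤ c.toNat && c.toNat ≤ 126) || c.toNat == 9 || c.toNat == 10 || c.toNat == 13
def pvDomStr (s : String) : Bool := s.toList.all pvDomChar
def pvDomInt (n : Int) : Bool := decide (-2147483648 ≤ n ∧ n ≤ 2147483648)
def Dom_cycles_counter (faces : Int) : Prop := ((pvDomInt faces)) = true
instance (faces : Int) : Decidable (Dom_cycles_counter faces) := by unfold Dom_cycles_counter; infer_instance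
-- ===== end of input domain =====

-- B computes max(faces,0)^4 in closed form instead of A's quadruple nested counting loop.

-- ===== PORT A =====
def cycles_counter (faces : Int) : Int :=
  (PySem.List.pyRange 0 faces 1).foldl (fun count _ =>
    (PySem.List.pyRange 0 faces 1).foldl (fun count _ =>
      (PySem.List.pyRange 0 faces 1).foldl (fun count _ =>
        (PySem.List.pyRange 0 faces 1).foldl (fun count _ => count + 1) count) count) count) 0

-- ===== PORT B =====
def cycles_counter_alt (faces : Int) : Int :=
  (if faces > 0 then faces else 0) ^ 4

-- ===== PRECONDITION & SPEC =====
def Spec_cycles_counter (faces : Int) (out : Int) : Prop := out = cycles_counter_alt faces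
instance (faces : Int) (out : Int) : Decidable (Spec_cycles_counter faces out) := by unfold Spec_cycles_counter; infer_instance

-- ===== CLAIM (what is proved, stated in full; the proofs are below) =====
def Claim_equal_cycles_counter : Prop := ∀ (faces : Int), Dom_cycles_counter faces → Spec_cycles_counter faces (cycles_counter faces)

-- ===== LEMMAS AND PROOFS =====

-- a fold that adds k per element adds length * k overall
theorem foldl_add_const (l : List Int) (k : Int) (c : Int) :
    l.foldl (fun acc _ => acc + k) c = c + l.length * k := by
  induction l generalizing c with
  | nil => simp
  | cons x xs ih => simp [List.foldl, ih]; ring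

-- ===== VERDICT (by name: the statement is the Claim_ definition above) =====
theorem cycles_counter_spec : Claim_equal_cycles_counter := by
  intro faces _
  unfold Spec_cycles_counter cycles_counter cycles_counter_alt
  set l := PySem.List.pyRange 0 faces 1 with hl
  set L : Int := (l.length : Int) with hL
  have hlen : L = if faces > 0 then faces else 0 := by
    rw [hL, hl, PySem.List.length_pyRange_one]
    split_ifs with h <;> omega
  have h1 : ∀ c : Int, l.foldl (fun count _ => count + 1) c = c + L := by
    intro c; rw [foldl_add_const, ← hL]; try ring
  simp only [h1]
  have h2 : ∀ c : Int, l.foldl (fun count _ => count + L) c = c + L * L := by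
    intro c; rw [foldl_add_const, ← hL]; try ring
  simp only [h2]
  have h3 : ∀ c : Int, l.foldl (fun count _ => count + L * L) c = c + L * (L * L) := by
    intro c; rw [foldl_add_const, ← hL]; try ring
  simp only [h3]
  rw [foldl_add_const, ← hL, hlen]
  ring
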